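-- pv_equiv track=rewrite | github.com/wyqian1027/wyqian1027.github.io | code/leetcode/probs/B001/code-python.py | findMaxNumChunks
-- ===== SOURCE A (Python) =====
-- def findMaxNumChunks(A, l=0):
--     n = len(A)
--     m = len(A) - l*2   # slice length
--     if m == 0:
--         return 0
--     for i in range(0, m//2):
--         if A[l:l+i+1] == A[n-l-i-1:n-l]:
--             return findMaxNumChunks(A, l+i+1) + 2
--     return 1
-- ===== SOURCE B (Python) =====
-- def _first_chunk(A, lo, hi):
--     # smallest size whose length-`size` windows at the two ends match, else 0
--     m = hi - lo
--     for size in range(1, m // 2 + 1):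
--         if all(A[lo + j] == A[hi - size + j] for j in range(size)):
--             return size
--     return 0
--
-- def findMaxNumChunks(A, l=0):
--     lo, hi = l, len(A) - l
--     count = 0
--     while True:
--         if hi - lo == 0:
--             return count          # nothing left
--         k = _first_chunk(A, lo, hi)
--         if k == 0:
--             return count + 1      # unsplittable remainder is one chunk
--         lo += k
--         hi -= k
--         count += 2
-- ===== Notes on version B (the rewrite author's own statement) =====
-- stated objective: alternative
-- what changed: Replaced A's recursion with slice-allocating comparisons by an iterative two-pointer loop that compares the candidate end windows element by element with short-circuit on the first mismatch.
-- outside the precondition, e.g. on findMaxNumChunks([5], -2): A returns 5, B raises IndexError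
import Mathlib
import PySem

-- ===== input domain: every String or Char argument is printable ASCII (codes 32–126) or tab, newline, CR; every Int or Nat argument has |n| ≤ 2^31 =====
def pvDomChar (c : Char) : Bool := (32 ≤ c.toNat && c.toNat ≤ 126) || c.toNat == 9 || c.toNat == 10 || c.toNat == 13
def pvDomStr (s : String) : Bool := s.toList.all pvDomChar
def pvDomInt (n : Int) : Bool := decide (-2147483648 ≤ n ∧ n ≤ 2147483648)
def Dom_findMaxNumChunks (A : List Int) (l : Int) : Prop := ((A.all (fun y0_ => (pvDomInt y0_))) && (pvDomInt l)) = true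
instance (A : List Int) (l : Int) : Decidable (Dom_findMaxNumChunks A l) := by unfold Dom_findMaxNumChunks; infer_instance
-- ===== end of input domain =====

-- B replaces A's recursion + slice comparisons by an iterative two-pointer loop with
-- short-circuit elementwise window comparison (objective: alternative decomposition).

-- ===== PORT A =====
def findMaxNumChunks (A : List Int) (l : Int) : Int :=
  let n : Int := A.length
  let m : Int := n - l * 2
  if m = 0 then 0
  else
    match hf : (PySem.List.pyRange 0 (PySem.Int.floordiv m 2) 1).find?
        (fun i => PySem.List.slice A (some l) (some (l + i + 1))
               == PySem.List.slice A (some (n - l - i - 1)) (some (n - l))) with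
    | some i => findMaxNumChunks A (l + i + 1) + 2
    | none => 1
termination_by (A.length - l * 2).toNat
decreasing_by
  have hmem := List.mem_of_find?_eq_some hf
  rw [PySem.List.mem_pyRange_one] at hmem
  have h2 : PySem.Int.floordiv m 2 = m / 2 := PySem.Int.floordiv_eq_ediv_of_pos (by omega)
  rw [h2] at hmem
  simp only [m, n] at *
  omega

-- ===== PORT B =====
-- termination helper for altLoop, cited in its decreasing_by
theorem fd2_bounds (m : Int) : 2 * PySem.Int.floordiv m 2 ≤ m ∧ m ≤ 2 * PySem.Int.floordiv m 2 + 1 := by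
  have h1 := PySem.Int.floordiv_mul_add_mod m 2
  have h2 := PySem.Int.mod_two_eq m
  rcases h2 with h | h <;> omega

def altChunkAt (A : List Int) (lo hi size : Int) : Bool :=
  (PySem.List.pyRange 0 size 1).all
    (fun j => PySem.List.pyGet? A (lo + j) == PySem.List.pyGet? A (hi - size + j))

-- Source B's _first_chunk: first size in range(1, m//2+1) whose end windows match (none = Python's 0)
def altFirstChunk (A : List Int) (lo hi : Int) : Option Int :=
  (PySem.List.pyRange 1 (PySem.Int.floordiv (hi - lo) 2 + 1) 1).find? (altChunkAt A lo hi)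

def altLoop (A : List Int) (lo hi count : Int) : Int :=
  if hi - lo = 0 then count
  else
    match hk : altFirstChunk A lo hi with
    | none => count + 1
    | some k => altLoop A (lo + k) (hi - k) (count + 2)
termination_by (hi - lo).toNat
decreasing_by
  have hmem := List.mem_of_find?_eq_some hk
  rw [PySem.List.mem_pyRange_one] at hmem
  have hb := fd2_bounds (hi - lo)
  omega

def findMaxNumChunks_alt (A : List Int) (l : Int) : Int :=
  altLoop A l ((A.length : Int) - l) 0

-- ===== PRECONDITION & SPEC =====
-- Pre_ excludes l < 0, where A returns a value through Python's negative-index slice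
-- wraparound while B's elementwise indexing raises IndexError.
def Pre_findMaxNumChunks (A : List Int) (l : Int) : Prop := 0 ≤ l
instance (A : List Int) (l : Int) : Decidable (Pre_findMaxNumChunks A l) := by unfold Pre_findMaxNumChunks; infer_instance
def pvWitness_findMaxNumChunks : List Int × Int := ([1, 2, 1], 0)

def Spec_findMaxNumChunks (A : List Int) (l : Int) (out : Int) : Prop := out = findMaxNumChunks_alt A l
instance (A : List Int) (l : Int) (out : Int) : Decidable (Spec_findMaxNumChunks A l out) := by unfold Spec_findMaxNumChunks; infer_instance

-- ===== CLAIM (what is proved, stated in full; the proofs are below) =====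
def Claim_equal_findMaxNumChunks : Prop := ∀ (A : List Int) (l : Int), Dom_findMaxNumChunks A l → Pre_findMaxNumChunks A l → Spec_findMaxNumChunks A l (findMaxNumChunks A l)

-- ===== LEMMAS AND PROOFS =====

theorem find?_congr_mem {α : Type} (l : List α) (p q : α → Bool)
    (h : ∀ x ∈ l, p x = q x) : l.find? p = l.find? q := by
  induction l with
  | nil => rfl
  | cons a t ih =>
    simp only [List.find?_cons]
    rw [h a (List.mem_cons_self)]
    split
    · rfl
    · exact ih (fun x hx => h x (List.mem_cons_of_mem a hx))

theorem pyGet?_window (A : List Int) (c j s : Int)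
    (hc : 0 ≤ c) (hj : 0 ≤ j) (hjs : j < s) :
    PySem.List.pyGet? A (c + j) = (List.take s.toNat (List.drop c.toNat A))[j.toNat]? := by
  rw [PySem.List.pyGet?_of_nonneg A (by omega)]
  rw [List.getElem?_take, List.getElem?_drop]
  rw [if_pos (by omega)]
  congr 1
  omega

-- slice equality as elementwise comparison on in-range windows
theorem slice_eq_all (A : List Int) (a b s : Int)
    (ha : 0 ≤ a) (hb : 0 ≤ b) (hs : 0 ≤ s)
    (has : a + s ≤ (A.length : Int)) (hbs : b + s ≤ (A.length : Int)) :
    (PySem.List.slice A (some a) (some (a + s)) == PySem.List.slice A (some b) (some (b + s)))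
    = (PySem.List.pyRange 0 s 1).all
        (fun j => PySem.List.pyGet? A (a + j) == PySem.List.pyGet? A (b + j)) := by
  have hsl : ∀ c : Int, 0 ≤ c →
      PySem.List.slice A (some c) (some (c + s)) = List.take s.toNat (List.drop c.toNat A) := by
    intro c hc
    rw [PySem.List.slice_toNat A hc (by omega)]
    congr 1
    omega
  rw [hsl a ha, hsl b hb]
  apply Bool.eq_iff_iff.mpr
  rw [beq_iff_eq, List.all_eq_true]
  constructor
  · intro heq j hj
    rw [PySem.List.mem_pyRange_one] at hj
    rw [pyGet?_window A a j s ha hj.1 hj.2, pyGet?_window A b j s hb hj.1 hj.2, heq]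
    simp
  · intro hall
    apply List.ext_getElem?
    intro k
    by_cases hk : k < s.toNat
    · have hjk := hall ((k : Int)) (by rw [PySem.List.mem_pyRange_one]; omega)
      simp only [beq_iff_eq] at hjk
      rw [pyGet?_window A a k s ha (by omega) (by omega),
          pyGet?_window A b k s hb (by omega) (by omega)] at hjk
      simpa using hjk
    · rw [List.getElem?_eq_none, List.getElem?_eq_none] <;>
        simp [List.length_take, List.length_drop] <;> omega

-- A's value when its find? is known
theorem fA_none (A : List Int) (l : Int) (hm : (A.length : Int) - l * 2 ≠ 0)
    (hfa : (PySem.List.pyRange 0 (PySem.Int.floordiv ((A.length : Int) - l * 2) 2) 1).find?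
        (fun i => PySem.List.slice A (some l) (some (l + i + 1))
               == PySem.List.slice A (some ((A.length : Int) - l - i - 1)) (some ((A.length : Int) - l))) = none) :
    findMaxNumChunks A l = 1 := by
  rw [findMaxNumChunks]
  simp only [if_neg hm]
  split
  · rename_i i heq
    rw [hfa] at heq
    cases heq
  · rfl

theorem fA_some (A : List Int) (l i : Int) (hm : (A.length : Int) - l * 2 ≠ 0)
    (hfa : (PySem.List.pyRange 0 (PySem.Int.floordiv ((A.length : Int) - l * 2) 2) 1).find?
        (fun i => PySem.List.slice A (some l) (some (l + i + 1))
               == PySem.List.slice A (some ((A.length : Int) - l - i - 1)) (some ((A.length : Int) - l))) = some i) :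
    findMaxNumChunks A l = findMaxNumChunks A (l + i + 1) + 2 := by
  rw [findMaxNumChunks]
  simp only [if_neg hm]
  split
  · rename_i i' heq
    rw [hfa] at heq
    cases heq
    rfl
  · rename_i heq
    rw [hfa] at heq
    cases heq

theorem altLoop_eq (A : List Int) (l count : Int) (h0 : 0 ≤ l) :
    altLoop A l ((A.length : Int) - l) count = count + findMaxNumChunks A l := by
  by_cases hm : (A.length : Int) - l * 2 = 0
  · rw [altLoop, findMaxNumChunks]
    rw [if_pos (by omega)]
    simp only [if_pos hm]
    omega
  · have hcb := fd2_bounds ((A.length : Int) - l * 2)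
    by_cases hneg : (A.length : Int) - l * 2 < 0
    · -- negative remaining length: both loop ranges are empty, both sides give 1 more chunk
      rw [altLoop, if_neg (by omega)]
      have hBv : altFirstChunk A l ((A.length : Int) - l) = none := by
        unfold altFirstChunk
        rw [PySem.List.pyRange_one_eq_nil (by
          have := fd2_bounds ((A.length : Int) - l - l)
          omega)]
        rfl
      have hAv : findMaxNumChunks A l = 1 := by
        apply fA_none A l hm
        rw [PySem.List.pyRange_one_eq_nil (by omega)]
        rfl
      split
      · rw [hAv]
      · rename_i k heq
        rw [hBv] at heq
        cases heq
    · have h2 : 2 * l < (A.length : Int) := by omega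
      have hB : altFirstChunk A l ((A.length : Int) - l) =
          Option.map (fun i => i + 1)
            ((PySem.List.pyRange 0 (PySem.Int.floordiv ((A.length : Int) - l * 2) 2) 1).find?
              (fun i => PySem.List.slice A (some l) (some (l + i + 1))
                 == PySem.List.slice A (some ((A.length : Int) - l - i - 1)) (some ((A.length : Int) - l)))) := by
        unfold altFirstChunk
        have harg : (A.length : Int) - l - l = (A.length : Int) - l * 2 := by ring
        rw [harg]
        have hmap : PySem.List.pyRange 1 (PySem.Int.floordiv ((A.length : Int) - l * 2) 2 + 1) 1
            = (PySem.List.pyRange 0 (PySem.Int.floordiv ((A.length : Int) - l * 2) 2) 1).map (fun i => i + 1) := by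
          rw [PySem.List.pyRange_one, PySem.List.pyRange_one, List.map_map]
          have he : (PySem.Int.floordiv ((A.length : Int) - l * 2) 2 + 1 - 1).toNat
              = (PySem.Int.floordiv ((A.length : Int) - l * 2) 2 - 0).toNat := by omega
          rw [he]
          apply List.map_congr_left
          intro k _
          simp
          ring
        rw [hmap, List.find?_map]
        congr 1
        apply find?_congr_mem
        intro i hi
        rw [PySem.List.mem_pyRange_one] at hi
        show altChunkAt A l ((A.length : Int) - l) (i + 1) = _
        unfold altChunkAt
        have hsl := slice_eq_all A l ((A.length : Int) - l - i - 1) (i + 1)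
          h0 (by omega) (by omega) (by omega) (by omega)
        have e1 : l + (i + 1) = l + i + 1 := by ring
        have e2 : ((A.length : Int) - l - i - 1) + (i + 1) = (A.length : Int) - l := by ring
        rw [e1, e2] at hsl
        have hfun : (fun j => PySem.List.pyGet? A (l + j) == PySem.List.pyGet? A ((A.length : Int) - l - (i + 1) + j))
            = (fun j => PySem.List.pyGet? A (l + j) == PySem.List.pyGet? A ((A.length : Int) - l - i - 1 + j)) := by
          funext j
          congr 3
          ring
        rw [hfun, ← hsl]
      rw [altLoop, if_neg (by omega)]
      cases hfa : (PySem.List.pyRange 0 (PySem.Int.floordiv ((A.length : Int) - l * 2) 2) 1).find?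
          (fun i => PySem.List.slice A (some l) (some (l + i + 1))
                 == PySem.List.slice A (some ((A.length : Int) - l - i - 1)) (some ((A.length : Int) - l))) with
      | none =>
        have hBv : altFirstChunk A l ((A.length : Int) - l) = none := by rw [hB, hfa]; rfl
        split
        · rw [fA_none A l hm hfa]
        · rename_i k heq
          rw [hBv] at heq
          cases heq
      | some i =>
        have hmem := PySem.List.mem_pyRange_one.mp (List.mem_of_find?_eq_some hfa)
        have hBv : altFirstChunk A l ((A.length : Int) - l) = some (i + 1) := by rw [hB, hfa]; rfl
        split
        · rename_i heq
          rw [hBv] at heq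
          cases heq
        · rename_i k heq
          rw [hBv] at heq
          cases heq
          have harg1 : l + (i + 1) = l + i + 1 := by ring
          have harg2 : (A.length : Int) - l - (i + 1) = (A.length : Int) - (l + i + 1) := by ring
          rw [harg1, harg2]
          rw [altLoop_eq A (l + i + 1) (count + 2) (by omega)]
          rw [fA_some A l i hm hfa]
          ring
termination_by ((A.length : Int) - l * 2).toNat
decreasing_by omega

-- ===== VERDICT (by name: the statement is the Claim_ definition above) =====
theorem findMaxNumChunks_spec : Claim_equal_findMaxNumChunks := by
  intro A l _ hpre
  unfold Spec_findMaxNumChunks findMaxNumChunks_alt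
  rw [altLoop_eq A l 0 hpre]
  omega
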